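-- pv_equiv track=rewrite | github.com/CaseyRo/mcp-bildsprache | mcp_bildsprache/gallery/app.py | _parse_brand_param
-- ===== SOURCE A (Python) =====
-- def _parse_brand_param(raw_values: list[str]) -> list[str]:
--     """Accept repeated ?brand=foo&brand=bar AND ?brand=foo,bar."""
--     out: list[str] = []
--     for val in raw_values:
--         for part in val.split(","):
--             part = part.strip()
--             if part:
--                 out.append(part)
--     return out
-- ===== SOURCE B (Python) =====
-- def _parse_brand_param(raw_values: list[str]) -> list[str]:
--     """Accept repeated ?brand=foo&brand=bar AND ?brand=foo,bar.
--
--     Single character-level scan (online state machine): never calls split()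
--     or strip(); tokens are emitted already trimmed by tracking the pending
--     internal whitespace separately.
--     """
--     out: list[str] = []
--     token = ""     # current token so far, with no leading/trailing whitespace
--     pending = ""   # whitespace seen since the last non-space char of token
--     for val in raw_values:
--         for ch in val:
--             if ch == ",":
--                 if token:
--                     out.append(token)
--                 token = ""
--                 pending = ""
--             elif ch.isspace():
--                 if token:
--                     pending += ch
--             else:
--                 token += pending + ch
--                 pending = ""
--         if token:
--             out.append(token)
--         token = ""
--         pending = ""
--     return out
-- ===== Notes on version B (the rewrite author's own statement) =====
-- stated objective: alternative
-- what changed: Replaces A's split-then-strip pipeline (val.split(',') and part.strip() per part) with a single character-level state machine that scans each value once, tracking the current token and its pending internal whitespace, and emits already-trimmed tokens online without ever calling split or strip.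
import Mathlib
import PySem

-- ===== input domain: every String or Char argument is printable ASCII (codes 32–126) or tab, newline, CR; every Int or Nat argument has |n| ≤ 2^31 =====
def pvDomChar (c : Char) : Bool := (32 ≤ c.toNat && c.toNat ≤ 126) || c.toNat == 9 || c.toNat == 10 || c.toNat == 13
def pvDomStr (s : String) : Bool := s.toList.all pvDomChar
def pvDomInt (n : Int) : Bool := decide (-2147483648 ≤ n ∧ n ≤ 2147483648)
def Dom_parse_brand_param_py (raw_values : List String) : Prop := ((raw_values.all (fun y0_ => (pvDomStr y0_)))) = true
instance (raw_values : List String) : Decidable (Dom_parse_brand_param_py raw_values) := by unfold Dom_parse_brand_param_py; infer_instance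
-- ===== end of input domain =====

-- B replaces A's split/strip pipeline by a single character-level state machine that
-- emits already-trimmed tokens online (objective: alternative algorithm, same cost).

-- ===== PORT A =====
-- A: for val in raw_values: for part in val.split(","): part = part.strip(); if part: out.append(part)
def parse_brand_param_py (raw_values : List String) : List String :=
  raw_values.foldl (fun out val =>
    ((PySem.Str.split? val ",").getD []).foldl (fun out part =>
      let part := PySem.Str.strip part
      if part ≠ "" then out ++ [part] else out) out) []

-- ===== PORT B =====
-- B's inner state machine: state = (out, token, pending); Python str token/pending are
-- modeled as List Char (PySem's representation of strings), emitted with String.ofList.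
def pvStep (st : List String × List Char × List Char) (c : Char) :
    List String × List Char × List Char :=
  if c = ',' then
    (if st.2.1 ≠ [] then st.1 ++ [String.ofList st.2.1] else st.1, [], [])
  else if PySem.Chars.isspace c then
    (st.1, st.2.1, if st.2.1 ≠ [] then st.2.2 ++ [c] else st.2.2)
  else
    (st.1, st.2.1 ++ st.2.2 ++ [c], [])

-- B's end-of-value flush: 'if token: out.append(token); token = ""; pending = ""'
def pvFlush (st : List String × List Char × List Char) :
    List String × List Char × List Char :=
  (if st.2.1 ≠ [] then st.1 ++ [String.ofList st.2.1] else st.1, [], [])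

def parse_brand_param_py_alt (raw_values : List String) : List String :=
  (raw_values.foldl (fun st val => pvFlush (val.toList.foldl pvStep st)) ([], [], [])).1

-- ===== PRECONDITION & SPEC =====
def Spec_parse_brand_param_py (raw_values : List String) (out : List String) : Prop := out = parse_brand_param_py_alt raw_values
instance (raw_values : List String) (out : List String) : Decidable (Spec_parse_brand_param_py raw_values out) := by unfold Spec_parse_brand_param_py; infer_instance

-- ===== CLAIM (what is proved, stated in full; the proofs are below) =====
def Claim_equal_parse_brand_param_py : Prop := ∀ (raw_values : List String), Dom_parse_brand_param_py raw_values → Spec_parse_brand_param_py raw_values (parse_brand_param_py raw_values)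

-- ===== LEMMAS AND PROOFS =====

-- common contribution of one value: stripped non-empty comma-parts (Chars level)
def pvG (val : String) : List String :=
  (((val.toList.splitOn ',').map PySem.Chars.strip).filter (fun p => p ≠ [])).map String.ofList

-- strip, spelled out (definitional)
theorem pv_strip_def (s : List Char) :
    PySem.Chars.strip s =
      ((s.dropWhile PySem.Chars.isspace).reverse.dropWhile PySem.Chars.isspace).reverse := rfl

-- PySem.Chars.splitOn on a one-char separator IS Mathlib's List.splitOn (fuel-loop characterised)
theorem pv_go_eq (c : Char) : ∀ (fuel : Nat) (l cur : List Char) (acc : List (List Char)),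
    l.length ≤ fuel →
    PySem.Chars.splitOn.go [c] fuel l cur acc =
      acc.reverse ++ ((l.splitOn c).modifyHead (cur.reverse ++ ·)) := by
  intro fuel
  induction fuel with
  | zero =>
    intro l cur acc h
    have : l = [] := List.eq_nil_of_length_eq_zero (Nat.le_zero.mp h)
    subst this
    simp [PySem.Chars.splitOn.go, List.splitOn, List.splitOnP_nil]
  | succ f ih =>
    intro l cur acc h
    cases l with
    | nil => simp [PySem.Chars.splitOn.go, List.splitOn, List.splitOnP_nil]
    | cons x rest =>
      rw [PySem.Chars.splitOn.go]
      by_cases hx : x = c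
      · subst hx
        have hp : [x].isPrefixOf (x :: rest) = true := by simp [List.isPrefixOf]
        rw [if_pos hp]
        simp only [List.length_cons, List.drop_succ_cons, List.length_nil, List.drop_zero]
        rw [ih rest [] _ (by simpa using Nat.le_of_succ_le_succ h)]
        simp [List.splitOn, List.splitOnP_cons]
        cases List.splitOnP (fun y => y == x) rest <;> simp
      · have hp : [c].isPrefixOf (x :: rest) = false := by
          simp [List.isPrefixOf]; exact fun hh => absurd hh.symm hx
        rw [if_neg (by simp [hp]), ih rest (x :: cur) acc (by simpa using Nat.le_of_succ_le_succ h)]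
        simp [List.splitOn, List.splitOnP_cons, hx]
        cases hy : List.splitOnP (fun y => y == c) rest with
        | nil => exact absurd hy (List.splitOnP_ne_nil _ _)
        | cons v vs => simp

theorem pv_splitOn_char (c : Char) (s : List Char) :
    PySem.Chars.splitOn s [c] = s.splitOn c := by
  rw [PySem.Chars.splitOn, pv_go_eq c (s.length + 1) s [] [] (by omega)]
  cases List.splitOn c s <;> simp

theorem pv_str_split_comma (s : String) :
    (PySem.Str.split? s ",").getD [] = (s.toList.splitOn ',').map String.ofList := by
  simp [PySem.Str.split?, PySem.Chars.split?, pv_splitOn_char]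

-- List.splitOn structural facts for the scan proof
theorem pv_splitOn_ne_nil (cs : List Char) : cs.splitOn ',' ≠ [] := by
  simp only [List.splitOn]; exact List.splitOnP_ne_nil _ _

theorem pv_splitOn_comma_cons (cs : List Char) :
    (',' :: cs).splitOn ',' = [] :: cs.splitOn ',' := by
  simp [List.splitOn, List.splitOnP_cons]

theorem pv_splitOn_other_cons (c : Char) (cs : List Char) (h : c ≠ ',') :
    (c :: cs).splitOn ',' = (cs.splitOn ',').modifyHead (c :: ·) := by
  simp [List.splitOn, List.splitOnP_cons, h]

-- invariant of B's scanner state: token already trimmed on both sides, pending all whitespace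
def pvInv (tok pend : List Char) : Prop :=
  tok.dropWhile PySem.Chars.isspace = tok ∧
  tok.reverse.dropWhile PySem.Chars.isspace = tok.reverse ∧
  pend.all PySem.Chars.isspace = true ∧ (tok = [] → pend = [])

theorem pv_strip_tok_pend (tok pend : List Char) (h : pvInv tok pend) :
    PySem.Chars.strip (tok ++ pend) = tok := by
  obtain ⟨h1, h2, h3, h4⟩ := h
  rcases List.eq_nil_or_concat tok with htok | _
  · subst htok; rw [h4 rfl]; simp [pv_strip_def]
  · rw [pv_strip_def, List.dropWhile_append, h1]
    have hne : tok ≠ [] := by rintro rfl; simp_all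
    rw [if_neg (by simpa [List.isEmpty_iff] using hne)]
    rw [List.reverse_append, List.dropWhile_append]
    have hpend : pend.reverse.dropWhile PySem.Chars.isspace = [] := by
      rw [List.dropWhile_eq_nil_iff]
      intro x hx; exact (List.all_eq_true.mp h3) x (List.mem_reverse.mp hx)
    rw [hpend]
    simp [h2]

theorem pv_strip_cons_ws (c : Char) (h : PySem.Chars.isspace c = true) (s : List Char) :
    PySem.Chars.strip (c :: s) = PySem.Chars.strip s := by
  rw [pv_strip_def, pv_strip_def, List.dropWhile_cons_of_pos h]

-- the contribution of the rest of the scan, given the current state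
def pvEmit (tok pend cs : List Char) : List (List Char) :=
  match cs.splitOn ',' with
  | [] => []
  | h :: t => PySem.Chars.strip (tok ++ pend ++ h) :: t.map PySem.Chars.strip

theorem pvEmit_nil_nil (cs : List Char) :
    pvEmit [] [] cs = (cs.splitOn ',').map PySem.Chars.strip := by
  unfold pvEmit
  cases h : cs.splitOn ',' with
  | nil => exact absurd h (pv_splitOn_ne_nil cs)
  | cons a t => simp

-- the scan lemma: folding pvStep then flushing appends exactly the trimmed non-empty tokens
theorem pv_scan : ∀ (cs : List Char) (out : List String) (tok pend : List Char),
    pvInv tok pend →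
    (pvFlush (cs.foldl pvStep (out, tok, pend))).1
      = out ++ ((pvEmit tok pend cs).filter (fun p => p ≠ [])).map String.ofList := by
  intro cs
  induction cs with
  | nil =>
    intro out tok pend hinv
    have hs : pvEmit tok pend [] = [PySem.Chars.strip (tok ++ pend ++ [])] := by
      unfold pvEmit; rw [List.splitOn_nil]; rfl
    rw [List.foldl_nil, hs]
    simp only [List.append_nil, pv_strip_tok_pend tok pend hinv]
    by_cases h : tok = [] <;> simp [pvFlush, h]
  | cons c cs ih =>
    intro out tok pend hinv
    by_cases hc : c = ','
    · subst hc
      have hstep : pvStep (out, tok, pend) ',' =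
          (if tok ≠ [] then out ++ [String.ofList tok] else out, [], []) := by
        simp [pvStep]
      have hemit : pvEmit tok pend (',' :: cs)
          = tok :: (cs.splitOn ',').map PySem.Chars.strip := by
        unfold pvEmit
        rw [pv_splitOn_comma_cons]
        simp [pv_strip_tok_pend tok pend hinv]
      rw [List.foldl_cons, hstep, ih _ [] [] (by simp [pvInv]), hemit, pvEmit_nil_nil]
      by_cases h : tok = [] <;> simp [h]
    · by_cases hw : PySem.Chars.isspace c = true
      · have hstep : pvStep (out, tok, pend) c =
            (out, tok, if tok ≠ [] then pend ++ [c] else pend) := by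
          simp [pvStep, hc, hw]
        by_cases h : tok = []
        · subst h
          have hp : pend = [] := hinv.2.2.2 rfl
          subst hp
          have hemit : pvEmit [] [] (c :: cs) = pvEmit [] [] cs := by
            unfold pvEmit
            rw [pv_splitOn_other_cons c cs hc]
            cases hs : cs.splitOn ',' with
            | nil => exact absurd hs (pv_splitOn_ne_nil cs)
            | cons a t => simp [pv_strip_cons_ws c hw]
          rw [List.foldl_cons, hstep, if_neg (by simp), ih _ [] [] hinv, hemit]
        · have hemit : pvEmit tok pend (c :: cs) = pvEmit tok (pend ++ [c]) cs := by
            unfold pvEmit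
            rw [pv_splitOn_other_cons c cs hc]
            cases hs : cs.splitOn ',' with
            | nil => exact absurd hs (pv_splitOn_ne_nil cs)
            | cons a t => simp
          have hinv' : pvInv tok (pend ++ [c]) := by
            obtain ⟨h1, h2, h3, _⟩ := hinv
            exact ⟨h1, h2, by simp [h3, hw], fun hh => absurd hh h⟩
          rw [List.foldl_cons, hstep, if_pos h, ih _ tok (pend ++ [c]) hinv', hemit]
      · have hstep : pvStep (out, tok, pend) c = (out, tok ++ pend ++ [c], []) := by
          simp [pvStep, hc, hw]
        have hinv' : pvInv (tok ++ pend ++ [c]) [] := by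
          obtain ⟨h1, h2, h3, h4⟩ := hinv
          refine ⟨?_, ?_, rfl, by simp⟩
          · by_cases h : tok = []
            · subst h; rw [h4 rfl]
              simp only [List.nil_append]
              exact List.dropWhile_cons_of_neg hw
            · rw [List.append_assoc, List.dropWhile_append, h1,
                if_neg (by simpa [List.isEmpty_iff] using h)]
          · rw [List.reverse_append, List.reverse_singleton,
              List.singleton_append, List.dropWhile_cons_of_neg hw]
        have hemit : pvEmit tok pend (c :: cs) = pvEmit (tok ++ pend ++ [c]) [] cs := by
          unfold pvEmit
          rw [pv_splitOn_other_cons c cs hc]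
          cases hs : cs.splitOn ',' with
          | nil => exact absurd hs (pv_splitOn_ne_nil cs)
          | cons a t => simp
        rw [List.foldl_cons, hstep, ih _ _ _ hinv', hemit]

-- one value of B's outer loop appends pvG val and resets the state
theorem pv_outer_step (out : List String) (val : String) :
    pvFlush (val.toList.foldl pvStep (out, [], [])) = (out ++ pvG val, [], []) := by
  have h1 : pvFlush (val.toList.foldl pvStep (out, [], []))
      = ((pvFlush (val.toList.foldl pvStep (out, [], []))).1, [], []) := rfl
  rw [h1, pv_scan val.toList out [] [] (by simp [pvInv]), pvEmit_nil_nil]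
  rfl

theorem pv_B_flat : ∀ (raw : List String) (out : List String),
    (raw.foldl (fun st val => pvFlush (val.toList.foldl pvStep st)) (out, [], [])).1
      = out ++ raw.flatMap pvG := by
  intro raw
  induction raw with
  | nil => intro out; simp
  | cons v vs ih =>
    intro out
    rw [List.foldl_cons, pv_outer_step, ih]
    simp

-- A's inner loop over one value's parts appends exactly its stripped non-empty parts
theorem pv_inner_eq (parts out : List String) :
    parts.foldl (fun out part =>
      let part := PySem.Str.strip part
      if part ≠ "" then out ++ [part] else out) out
    = out ++ (parts.map PySem.Str.strip).filter (fun p => p != "") := by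
  induction parts generalizing out with
  | nil => simp
  | cons p ps ih =>
    simp only [List.foldl_cons]
    rw [ih]
    by_cases h : PySem.Str.strip p = "" <;> simp [h]

theorem pv_strip_ofList (p : List Char) :
    PySem.Str.strip (String.ofList p) = String.ofList (PySem.Chars.strip p) := by
  conv_lhs => rw [← String.ofList_toList (s := PySem.Str.strip (String.ofList p))]
  congr 1
  simp

theorem pv_ofList_ne_empty (p : List Char) : (String.ofList p != "") = !p.isEmpty := by
  cases p with
  | nil => rfl
  | cons a t =>
    have : String.ofList (a :: t) ≠ "" := by
      intro h
      have := congrArg String.toList h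
      simp at this
    simp [this]

-- A's per-value contribution equals pvG
theorem pv_A_val (val : String) :
    (((PySem.Str.split? val ",").getD []).map PySem.Str.strip).filter (fun p => p != "")
      = pvG val := by
  rw [pv_str_split_comma, List.map_map]
  have hmap : (PySem.Str.strip ∘ String.ofList) = (String.ofList ∘ PySem.Chars.strip) := by
    funext p; exact pv_strip_ofList p
  rw [hmap, ← List.map_map, List.filter_map, pvG]
  congr 1
  apply List.filter_congr
  intro q _
  simp only [Function.comp_apply, pv_ofList_ne_empty]
  cases q <;> simp

theorem pv_A_flat (raw : List String) : ∀ (acc : List String),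
    raw.foldl (fun out val =>
      ((PySem.Str.split? val ",").getD []).foldl (fun out part =>
        let part := PySem.Str.strip part
        if part ≠ "" then out ++ [part] else out) out) acc
    = acc ++ raw.flatMap pvG := by
  induction raw with
  | nil => intro acc; simp
  | cons v vs ih =>
    intro acc
    simp only [List.foldl_cons]
    rw [pv_inner_eq, pv_A_val, ih]
    simp

-- ===== VERDICT (by name: the statement is the Claim_ definition above) =====
theorem parse_brand_param_py_spec : Claim_equal_parse_brand_param_py := by
  intro raw _
  unfold Spec_parse_brand_param_py parse_brand_param_py parse_brand_param_py_alt
  rw [pv_A_flat raw [], pv_B_flat raw []]
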